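-- pv_equiv track=rewrite | github.com/AtaBass/araDonemProje | bertopic_xgboost/bertopic_product_analyzer.py | _assign_review_to_aspects
-- ===== SOURCE A (Python) =====
-- def _assign_review_to_aspects(
--     text_lower: str,
--     aspect_kws: dict[str, list[str]],
--     min_matches: int = 1,
-- ) -> list[str]:
--     """
--     Bir yorumun hangi aspect'lerden bahsettiğini keyword eşleştirmeyle saptar.
--     Multi-label: bir yorum birden fazla aspect döndürebilir.
--     min_matches: kaç farklı keyword gerektiği (metin uzunluğuna göre dışardan belirlenir).
--     """
--     matched: list[str] = []
--     for label, kws in aspect_kws.items():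
--         hit_kws = {kw for kw in kws if kw in text_lower}  # set → tekrarı önler
--         if len(hit_kws) >= min_matches:
--             matched.append(label)
--     return matched
-- ===== SOURCE B (Python) =====
-- def _assign_review_to_aspects(
--     text_lower: str,
--     aspect_kws: dict[str, list[str]],
--     min_matches: int = 1,
-- ) -> list[str]:
--     # Inverted index keyword -> entry indices: each distinct keyword is
--     # substring-tested against the text exactly once, and its hit is propagated
--     # to per-label counters through the index; labels kept in original order.
--     index: dict[str, list[int]] = {}
--     for i, kws in enumerate(aspect_kws.values()):
--         for kw in set(kws):
--             index.setdefault(kw, []).append(i)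
--     counts = [0] * len(aspect_kws)
--     for kw, entries in index.items():
--         if kw in text_lower:
--             for i in entries:
--                 counts[i] += 1
--     labels = list(aspect_kws.keys())
--     return [label for label, c in zip(labels, counts) if c >= min_matches]
-- ===== Notes on version B (the rewrite author's own statement) =====
-- stated objective: alternative
-- what changed: B builds an inverted index keyword->entry indices, substring-tests each distinct keyword against the text exactly once, propagates hits to a per-label counter array through the index, and emits labels by zipping counters with the label list, instead of A's per-label set comprehension that re-runs the substring search inside every label's loop.
import Mathlib
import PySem

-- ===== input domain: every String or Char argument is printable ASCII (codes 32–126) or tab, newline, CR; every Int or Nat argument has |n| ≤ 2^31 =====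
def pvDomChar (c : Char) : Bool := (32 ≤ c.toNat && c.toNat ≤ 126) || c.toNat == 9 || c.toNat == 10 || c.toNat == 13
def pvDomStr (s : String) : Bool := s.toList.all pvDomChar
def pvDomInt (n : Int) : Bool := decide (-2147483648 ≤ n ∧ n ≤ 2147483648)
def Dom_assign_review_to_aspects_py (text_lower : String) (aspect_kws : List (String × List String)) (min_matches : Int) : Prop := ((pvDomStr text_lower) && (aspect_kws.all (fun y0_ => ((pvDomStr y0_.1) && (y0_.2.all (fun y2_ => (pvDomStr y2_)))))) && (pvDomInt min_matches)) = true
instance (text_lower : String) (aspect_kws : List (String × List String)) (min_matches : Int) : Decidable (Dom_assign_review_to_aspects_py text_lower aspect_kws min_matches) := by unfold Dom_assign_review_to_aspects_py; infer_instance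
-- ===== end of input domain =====

-- B replaces A's per-label substring scans by an inverted index keyword -> entry indices:
-- each distinct keyword is substring-tested once and hits flow to per-label counters (alternative algorithm).

-- ===== PORT A =====
def assign_review_to_aspects_py (text_lower : String) (aspect_kws : List (String × List String)) (min_matches : Int) : List String :=
  aspect_kws.foldl (fun matched p =>
    let hit_kws : PySem.Set String := PySem.Set.ofList (p.2.filter (fun kw => PySem.Str.isIn kw text_lower))
    if min_matches ≤ (hit_kws.length : Int) then matched ++ [p.1] else matched) []

-- ===== PORT B =====
-- phase 1 of Source B: inverted index keyword -> entry indices (Python's enumerate = zipIdx; list positions, hence Nat)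
def pvIndex (aspect_kws : List (String × List String)) : PySem.Dict String (List Nat) :=
  ((aspect_kws.map Prod.snd).zipIdx).foldl (fun d ki =>
    (PySem.Set.ofList ki.1).foldl (fun d kw => d.insert kw (d.getD kw [] ++ [ki.2])) d)
    PySem.Dict.empty

-- 'counts[i] += 1' (every i here is < counts.length, where List.set / List.getD are exact)
def pvBump (c : List Int) (e : List Nat) : List Int :=
  e.foldl (fun c i => c.set i (c.getD i 0 + 1)) c

-- phase 2 of Source B: each occurring keyword bumps the counters of its entries
def pvCounts (text_lower : String) (aspect_kws : List (String × List String)) : List Int :=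
  (pvIndex aspect_kws).items.foldl (fun c ke =>
    if PySem.Str.isIn ke.1 text_lower then pvBump c ke.2 else c)
    (List.replicate aspect_kws.length (0 : Int))

def assign_review_to_aspects_py_alt (text_lower : String) (aspect_kws : List (String × List String)) (min_matches : Int) : List String :=
  (((aspect_kws.map Prod.fst).zip (pvCounts text_lower aspect_kws)).filter
      (fun lc => min_matches ≤ lc.2)).map Prod.fst

-- ===== PRECONDITION & SPEC =====
def Spec_assign_review_to_aspects_py (text_lower : String) (aspect_kws : List (String × List String)) (min_matches : Int) (out : List String) : Prop := out = assign_review_to_aspects_py_alt text_lower aspect_kws min_matches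
instance (text_lower : String) (aspect_kws : List (String × List String)) (min_matches : Int) (out : List String) : Decidable (Spec_assign_review_to_aspects_py text_lower aspect_kws min_matches out) := by unfold Spec_assign_review_to_aspects_py; infer_instance

-- ===== CLAIM (what is proved, stated in full; the proofs are below) =====
def Claim_equal_assign_review_to_aspects_py : Prop := ∀ (text_lower : String) (aspect_kws : List (String × List String)) (min_matches : Int), Dom_assign_review_to_aspects_py text_lower aspect_kws min_matches → Spec_assign_review_to_aspects_py text_lower aspect_kws min_matches (assign_review_to_aspects_py text_lower aspect_kws min_matches)

-- ===== LEMMAS AND PROOFS =====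

-- |set(filter P kws)| = number of P-satisfying elements of set(kws)
lemma len_set_filter (P : String → Bool) (kws : List String) :
    (PySem.Set.ofList (kws.filter P)).length = (PySem.Set.ofList kws).countP P := by
  rw [List.countP_eq_length_filter]
  have hperm : List.Perm (PySem.Set.ofList (kws.filter P)) ((PySem.Set.ofList kws).filter P) := by
    rw [List.perm_ext_iff_of_nodup (PySem.Set.nodup_ofList _) ((PySem.Set.nodup_ofList _).filter P)]
    intro a
    simp [PySem.Set.mem_ofList, List.mem_filter]
  exact hperm.length_eq

lemma getD_inner_not_mem (s : List String) (i : Nat) (kw : String)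
    (hkw : kw ∉ s) : ∀ (d : PySem.Dict String (List Nat)),
    (s.foldl (fun d kw' => d.insert kw' (d.getD kw' [] ++ [i])) d).getD kw [] = d.getD kw [] := by
  induction s with
  | nil => intro d; rfl
  | cons a s ih =>
    intro d
    simp only [List.mem_cons, not_or] at hkw
    rw [List.foldl_cons, ih hkw.2, PySem.Dict.getD_insert_of_ne _ _ _ hkw.1]

lemma getD_inner (s : List String) (hs : s.Nodup) (i : Nat) (kw : String) :
    ∀ (d : PySem.Dict String (List Nat)),
    (s.foldl (fun d kw' => d.insert kw' (d.getD kw' [] ++ [i])) d).getD kw [] =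
      d.getD kw [] ++ (if kw ∈ s then [i] else []) := by
  induction s with
  | nil => intro d; simp
  | cons a s ih =>
    intro d
    rw [List.foldl_cons]
    by_cases hak : kw = a
    · subst hak
      have hns : kw ∉ s := (List.nodup_cons.mp hs).1
      rw [getD_inner_not_mem s i kw hns, PySem.Dict.getD_insert_self]
      simp
    · rw [ih (List.nodup_cons.mp hs).2, PySem.Dict.getD_insert_of_ne _ _ _ hak]
      simp [List.mem_cons, hak]

lemma getD_outer (kw : String) (L : List (List String)) : ∀ (k : Nat) (d : PySem.Dict String (List Nat)),
    ((L.zipIdx k).foldl (fun d ki => (PySem.Set.ofList ki.1).foldl (fun d kw' => d.insert kw' (d.getD kw' [] ++ [ki.2])) d) d).getD kw [] =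
      d.getD kw [] ++ (((L.zipIdx k).filter (fun ki => decide (kw ∈ PySem.Set.ofList ki.1))).map Prod.snd) := by
  induction L with
  | nil => intro k d; simp
  | cons a L ih =>
    intro k d
    rw [List.zipIdx_cons, List.foldl_cons, ih (k+1), getD_inner _ (PySem.Set.nodup_ofList a) k kw d]
    by_cases h : kw ∈ a
    · have h2 : kw ∈ PySem.Set.ofList a := (PySem.Set.mem_ofList _ _).mpr h
      simp [h, h2]
    · have h2 : kw ∉ PySem.Set.ofList a := fun hc => h ((PySem.Set.mem_ofList _ _).mp hc)
      simp [h, h2]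

lemma nodup_keys_outer (L : List (List String × Nat)) : ∀ (d : PySem.Dict String (List Nat)), d.keys.Nodup →
    (L.foldl (fun d ki => (PySem.Set.ofList ki.1).foldl (fun d kw' => d.insert kw' (d.getD kw' [] ++ [ki.2])) d) d).keys.Nodup := by
  induction L with
  | nil => intro d h; exact h
  | cons a L ih =>
    intro d h
    exact ih _ (PySem.Dict.nodup_keys_foldl_insert _ _ _ h)


lemma getD_pvIndex (akw : List (String × List String)) (kw : String) :
    (pvIndex akw).getD kw [] =
      (((akw.map Prod.snd).zipIdx).filter
        (fun ki => decide (kw ∈ PySem.Set.ofList ki.1))).map Prod.snd := by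
  unfold pvIndex
  rw [getD_outer]
  simp [PySem.Dict.getD_empty]

lemma nodup_keys_pvIndex (akw : List (String × List String)) :
    (pvIndex akw).keys.Nodup := by
  unfold pvIndex
  exact nodup_keys_outer _ _ (by simp [PySem.Dict.keys_empty])

lemma mem_keys_pvIndex_of_mem (akw : List (String × List String)) (kw : String)
    {j : Nat} (hj : j < akw.length) (hkw : kw ∈ (akw[j]'hj).2) :
    kw ∈ (pvIndex akw).keys := by
  by_contra hnk
  have hc : (pvIndex akw).contains kw = false := by
    cases hb : (pvIndex akw).contains kw with
    | false => rfl
    | true => exact absurd ((PySem.Dict.contains_iff_mem_keys _ _).mp hb) hnk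
  have hz : (pvIndex akw).getD kw [] = [] := PySem.Dict.getD_of_not_contains _ _ hc
  rw [getD_pvIndex] at hz
  have hjl : j < (akw.map Prod.snd).length := by simpa using hj
  have hmem : ((akw.map Prod.snd)[j]'hjl, j) ∈ (akw.map Prod.snd).zipIdx := by
    have := List.getElem_zipIdx (l := akw.map Prod.snd) (j := 0) (i := j)
      (by simpa using hj)
    rw [Nat.zero_add] at this
    rw [← this]
    exact List.getElem_mem _
  have hkw' : kw ∈ PySem.Set.ofList ((akw.map Prod.snd)[j]'hjl) := by
    rw [PySem.Set.mem_ofList]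
    simpa [List.getElem_map] using hkw
  have : j ∈ (((akw.map Prod.snd).zipIdx).filter
        (fun ki => decide (kw ∈ PySem.Set.ofList ki.1))).map Prod.snd := by
    exact List.mem_map.mpr ⟨_, List.mem_filter.mpr ⟨hmem, by simpa using hkw'⟩, rfl⟩
  rw [hz] at this
  exact absurd this (List.not_mem_nil)

lemma map_snd_zipIdx' (L : List (List String)) : ∀ k, (L.zipIdx k).map Prod.snd = List.range' k L.length := by
  induction L with
  | nil => intro k; simp
  | cons a L ih => intro k; simp [List.zipIdx_cons, List.range'_succ, ih]

lemma count_getD_pvIndex (akw : List (String × List String)) (kw : String)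
    {j : Nat} (hj : j < akw.length) :
    ((pvIndex akw).getD kw []).count j = if kw ∈ (akw[j]'hj).2 then 1 else 0 := by
  rw [getD_pvIndex]
  have hnd : ((((akw.map Prod.snd).zipIdx).filter
      (fun ki => decide (kw ∈ PySem.Set.ofList ki.1))).map Prod.snd).Nodup := by
    have hsub : (((akw.map Prod.snd).zipIdx).filter
        (fun ki => decide (kw ∈ PySem.Set.ofList ki.1))).map Prod.snd |>.Sublist
        (((akw.map Prod.snd).zipIdx).map Prod.snd) :=
      List.Sublist.map _ List.filter_sublist
    rw [map_snd_zipIdx'] at hsub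
    exact hsub.nodup (List.nodup_range' 1)
  rw [hnd.count]
  have hiff : j ∈ (((akw.map Prod.snd).zipIdx).filter
      (fun ki => decide (kw ∈ PySem.Set.ofList ki.1))).map Prod.snd ↔ kw ∈ (akw[j]'hj).2 := by
    constructor
    · rintro hmem
      obtain ⟨ki, hki, hsnd⟩ := List.mem_map.mp hmem
      obtain ⟨hkiz, hpred⟩ := List.mem_filter.mp hki
      obtain ⟨x, i⟩ := ki
      obtain ⟨-, hlt, hx⟩ := List.mem_zipIdx hkiz
      simp only at hsnd
      subst hsnd
      simp only [hx] at hpred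
      have := (PySem.Set.mem_ofList _ _).mp (of_decide_eq_true hpred)
      simpa [List.getElem_map] using this
    · intro hkw
      have hjl : j < (akw.map Prod.snd).length := by simpa using hj
      have hmem : ((akw.map Prod.snd)[j]'hjl, j) ∈ (akw.map Prod.snd).zipIdx := by
        have := List.getElem_zipIdx (l := akw.map Prod.snd) (j := 0) (i := j) (by simpa using hj)
        rw [Nat.zero_add] at this
        rw [← this]
        exact List.getElem_mem _
      refine List.mem_map.mpr ⟨_, List.mem_filter.mpr ⟨hmem, ?_⟩, rfl⟩
      simp only [decide_eq_true_eq, PySem.Set.mem_ofList]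
      simpa [List.getElem_map] using hkw
  rw [if_congr hiff rfl rfl]


lemma length_pvBump (e : List Nat) : ∀ (c : List Int), (pvBump c e).length = c.length := by
  induction e with
  | nil => intro c; rfl
  | cons i e ih => intro c; rw [pvBump, List.foldl_cons, ← pvBump, ih, List.length_set]

lemma getD_pvBump (e : List Nat) : ∀ (c : List Int), (∀ i ∈ e, i < c.length) → ∀ (j : Nat),
    (pvBump c e).getD j 0 = c.getD j 0 + (e.count j : Int) := by
  induction e with
  | nil => intro c _ j; simp [pvBump]
  | cons i e ih =>
    intro c hlt j
    rw [pvBump, List.foldl_cons, ← pvBump]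
    have hi : i < c.length := hlt i (List.mem_cons_self)
    have hlt' : ∀ x ∈ e, x < (c.set i (c.getD i 0 + 1)).length := by
      intro x hx; rw [List.length_set]; exact hlt x (List.mem_cons_of_mem _ hx)
    rw [ih _ hlt' j, List.count_cons]
    by_cases hij : i = j
    · subst hij
      rw [List.getD_eq_getElem?_getD, List.getElem?_set_self hi, List.getD_eq_getElem?_getD]
      simp
      omega
    · rw [List.getD_eq_getElem?_getD, List.getElem?_set_ne hij, ← List.getD_eq_getElem?_getD]
      simp [hij]

lemma length_countsFold (t : String) (its : List (String × List Nat)) : ∀ (c : List Int),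
    (its.foldl (fun c ke => if PySem.Str.isIn ke.1 t then pvBump c ke.2 else c) c).length = c.length := by
  induction its with
  | nil => intro c; rfl
  | cons ke its ih =>
    intro c
    rw [List.foldl_cons, ih]
    split_ifs with h
    · rw [length_pvBump]
    · rfl

lemma getD_countsFold (t : String) (its : List (String × List Nat)) : ∀ (c : List Int),
    (∀ ke ∈ its, ∀ i ∈ ke.2, i < c.length) → ∀ (j : Nat),
    (its.foldl (fun c ke => if PySem.Str.isIn ke.1 t then pvBump c ke.2 else c) c).getD j 0 =
      c.getD j 0 + (its.map (fun ke => if PySem.Str.isIn ke.1 t then (ke.2.count j : Int) else 0)).sum := by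
  induction its with
  | nil => intro c _ j; simp
  | cons ke its ih =>
    intro c hlt j
    rw [List.foldl_cons, List.map_cons, List.sum_cons]
    have htail : ∀ ke' ∈ its, ∀ i ∈ ke'.2, i < (if PySem.Str.isIn ke.1 t then pvBump c ke.2 else c).length := by
      intro ke' h' i hi
      split_ifs with h
      · rw [length_pvBump]; exact hlt ke' (List.mem_cons_of_mem _ h') i hi
      · exact hlt ke' (List.mem_cons_of_mem _ h') i hi
    rw [ih _ htail j]
    by_cases h : PySem.Str.isIn ke.1 t
    · rw [if_pos h, if_pos h, getD_pvBump _ _ (fun i hi => hlt ke List.mem_cons_self i hi) j]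
      ring
    · rw [if_neg h, if_neg h]
      ring


lemma length_pvCounts (t : String) (akw : List (String × List String)) :
    (pvCounts t akw).length = akw.length := by
  unfold pvCounts
  rw [length_countsFold, List.length_replicate]

lemma getD_pvCounts (t : String) (akw : List (String × List String))
    {j : Nat} (hj : j < akw.length) :
    (pvCounts t akw).getD j 0 =
      (((PySem.Set.ofList (akw[j]'hj).2).countP (fun kw => PySem.Str.isIn kw t) : Nat) : Int) := by
  unfold pvCounts
  have hb : ∀ ke ∈ (pvIndex akw).items, ∀ i ∈ ke.2, i < (List.replicate akw.length (0:Int)).length := by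
    intro ke hke i hi
    have he : ke.2 = (pvIndex akw).getD ke.1 [] :=
      (PySem.Dict.getD_of_mem_items _ hke (nodup_keys_pvIndex akw) []).symm
    rw [he, getD_pvIndex] at hi
    obtain ⟨ki, hki, hsnd⟩ := List.mem_map.mp hi
    obtain ⟨hkiz, -⟩ := List.mem_filter.mp hki
    obtain ⟨x, i'⟩ := ki
    obtain ⟨-, hlt, -⟩ := List.mem_zipIdx hkiz
    simp only at hsnd
    subst hsnd
    simpa using hlt
  rw [getD_countsFold t _ _ hb j]
  have h0 : (List.replicate akw.length (0:Int)).getD j 0 = 0 := by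
    rw [List.getD_eq_getElem?_getD, List.getElem?_replicate]
    split_ifs <;> rfl
  rw [h0, zero_add]
  have hmap : (pvIndex akw).items.map (fun ke => if PySem.Str.isIn ke.1 t then (ke.2.count j : Int) else 0)
      = (pvIndex akw).items.map (fun ke => if (PySem.Str.isIn ke.1 t && decide (ke.1 ∈ (akw[j]'hj).2)) then (1:Int) else 0) := by
    apply List.map_congr_left
    intro ke hke
    have he : ke.2 = (pvIndex akw).getD ke.1 [] :=
      (PySem.Dict.getD_of_mem_items _ hke (nodup_keys_pvIndex akw) []).symm
    rw [he, count_getD_pvIndex akw ke.1 hj]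
    by_cases h1 : PySem.Str.isIn ke.1 t <;> by_cases h2 : ke.1 ∈ (akw[j]'hj).2 <;>
      simp [h1, h2]
  rw [hmap]
  have hkeys : (pvIndex akw).items.map (fun ke => if (PySem.Str.isIn ke.1 t && decide (ke.1 ∈ (akw[j]'hj).2)) then (1:Int) else 0)
      = (pvIndex akw).keys.map (fun kw => if (PySem.Str.isIn kw t && decide (kw ∈ (akw[j]'hj).2)) then (1:Int) else 0) := by
    simp only [PySem.Dict.keys, List.map_map]
    rfl
  rw [hkeys, PySem.List.sum_map_ite_one_zero]
  congr 1
  rw [List.countP_eq_length_filter, ← List.filter_filter, ← List.countP_eq_length_filter]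
  have hperm : List.Perm ((pvIndex akw).keys.filter (fun kw => decide (kw ∈ (akw[j]'hj).2)))
      (PySem.Set.ofList (akw[j]'hj).2) := by
    rw [List.perm_ext_iff_of_nodup ((nodup_keys_pvIndex akw).filter _) (PySem.Set.nodup_ofList _)]
    intro a
    simp only [List.mem_filter, PySem.Set.mem_ofList, decide_eq_true_eq]
    exact ⟨fun h => h.2, fun h2 => ⟨mem_keys_pvIndex_of_mem akw a hj h2, h2⟩⟩
  exact hperm.countP_eq _

lemma pvCounts_eq_map (t : String) (akw : List (String × List String)) :
    pvCounts t akw = akw.map (fun p => (((PySem.Set.ofList p.2).countP (fun kw => PySem.Str.isIn kw t) : Nat) : Int)) := by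
  apply List.ext_getElem
  · rw [length_pvCounts, List.length_map]
  · intro j h1 h2
    have hj : j < akw.length := by rwa [length_pvCounts] at h1
    have := getD_pvCounts t akw hj
    rw [List.getD_eq_getElem?_getD, List.getElem?_eq_getElem h1] at this
    simp only [Option.getD_some] at this
    rw [this, List.getElem_map]

-- ===== VERDICT (by name: the statement is the Claim_ definition above) =====
theorem assign_review_to_aspects_py_spec : Claim_equal_assign_review_to_aspects_py := by
  intro t akw m _
  unfold Spec_assign_review_to_aspects_py assign_review_to_aspects_py assign_review_to_aspects_py_alt
  rw [PySem.List.foldl_append_ite (p := fun p : String × List String =>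
        m ≤ ((PySem.Set.ofList (p.2.filter (fun kw => PySem.Str.isIn kw t))).length : Int))
      (f := Prod.fst)]
  rw [pvCounts_eq_map, List.zip_map', List.filter_map, List.map_map, List.nil_append]
  refine congrArg _ (List.filter_congr ?_)
  intro p _
  simp only [Function.comp]
  rw [len_set_filter]
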